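-- pv_equiv track=rewrite | github.com/jmomugtong/AccompanAIment | backend/src/music/voicing_generator.py | _build_symbol_voicing
-- ===== SOURCE A (Python) =====
-- MIN_MIDI = 36  # C2
--
-- MAX_MIDI = 84  # C6
--
-- def _clamp_to_register(midi_note: int) -> int:
--     """Move a MIDI note into the valid register by shifting octaves."""
--     while midi_note < MIN_MIDI:
--         midi_note += 12
--     while midi_note > MAX_MIDI:
--         midi_note -= 12
--     return midi_note
--
-- def _build_symbol_voicing(
--     pitch_classes: list[int], root_pc: int
-- ) -> list[int]:
--     """Build a voicing using all pitch classes from the chord symbol.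
--
--     Used when the chord symbol itself specifies extensions (e.g. C7, Cmaj7)
--     and we want to honor them regardless of style.
--     """
--     root_midi = root_pc + 48
--     if root_midi < MIN_MIDI:
--         root_midi += 12
--
--     notes = [root_midi]
--     for pc in pitch_classes:
--         if pc == root_pc:
--             continue
--         n = pc + 48
--         while n <= root_midi:
--             n += 12
--         n = _clamp_to_register(n)
--         notes.append(n)
--
--     return sorted(notes)
-- ===== SOURCE B (Python) =====
-- MIN_MIDI = 36
-- MAX_MIDI = 84
--
-- def _octave_fold(n: int, root_midi: int) -> int:
--     """Smallest value > root_midi congruent to n mod 12, folded into [36, 84]."""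
--     if n <= root_midi:
--         n += 12 * ((root_midi - n) // 12 + 1)
--     if n < MIN_MIDI:
--         n += 12 * ((MIN_MIDI - 1 - n) // 12 + 1)
--     elif n > MAX_MIDI:
--         n -= 12 * ((n - MAX_MIDI - 1) // 12 + 1)
--     return n
--
-- def _build_symbol_voicing(pitch_classes: list[int], root_pc: int) -> list[int]:
--     root_midi = root_pc + 48
--     if root_midi < MIN_MIDI:
--         root_midi += 12
--     return sorted(
--         [root_midi]
--         + [_octave_fold(pc + 48, root_midi) for pc in pitch_classes if pc != root_pc]
--     )
-- ===== Notes on version B (the rewrite author's own statement) =====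
-- stated objective: faster
-- what changed: The three octave-shifting while-loops (raise above root, clamp below 36, clamp above 84) are replaced by closed-form floor-division arithmetic, and the explicit append loop by a filtered list comprehension.
import Mathlib
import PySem

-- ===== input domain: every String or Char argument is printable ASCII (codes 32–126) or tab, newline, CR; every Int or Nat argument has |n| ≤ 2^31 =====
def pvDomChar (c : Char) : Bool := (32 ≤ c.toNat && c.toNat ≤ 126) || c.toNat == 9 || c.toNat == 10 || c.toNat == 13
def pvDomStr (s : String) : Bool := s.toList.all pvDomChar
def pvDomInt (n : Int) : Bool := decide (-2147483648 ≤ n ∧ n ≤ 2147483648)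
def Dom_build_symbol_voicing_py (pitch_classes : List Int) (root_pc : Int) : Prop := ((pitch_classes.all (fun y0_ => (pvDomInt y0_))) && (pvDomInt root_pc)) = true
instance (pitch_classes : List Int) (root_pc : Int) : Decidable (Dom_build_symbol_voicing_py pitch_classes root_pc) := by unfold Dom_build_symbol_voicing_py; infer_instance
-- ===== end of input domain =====

-- B replaces A's three octave-shifting while-loops by closed-form floor-division arithmetic
-- and the explicit append loop by a comprehension (alternative/idiomatic; same result).

-- ===== PORT A =====
-- while midi_note < MIN_MIDI: midi_note += 12
def pvClampLow (n : Int) : Int :=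
  if n < 36 then pvClampLow (n + 12) else n
termination_by (36 - n).toNat
decreasing_by omega

-- while midi_note > MAX_MIDI: midi_note -= 12
def pvClampHigh (n : Int) : Int :=
  if n > 84 then pvClampHigh (n - 12) else n
termination_by (n - 84).toNat
decreasing_by omega

-- while n <= root_midi: n += 12
def pvRaiseAbove (root_midi n : Int) : Int :=
  if n ≤ root_midi then pvRaiseAbove root_midi (n + 12) else n
termination_by (root_midi + 1 - n).toNat
decreasing_by omega

def build_symbol_voicing_py (pitch_classes : List Int) (root_pc : Int) : List Int :=
  let root_midi0 := root_pc + 48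
  let root_midi := if root_midi0 < 36 then root_midi0 + 12 else root_midi0
  let notes := pitch_classes.foldl
    (fun acc pc =>
      if pc == root_pc then acc
      else acc ++ [pvClampHigh (pvClampLow (pvRaiseAbove root_midi (pc + 48)))])
    [root_midi]
  PySem.List.sorted notes (fun x => x) false

-- ===== PORT B =====
def pvOctaveFold (n root_midi : Int) : Int :=
  let n1 := if n ≤ root_midi then n + 12 * (PySem.Int.floordiv (root_midi - n) 12 + 1) else n
  if n1 < 36 then n1 + 12 * (PySem.Int.floordiv (36 - 1 - n1) 12 + 1)
  else if n1 > 84 then n1 - 12 * (PySem.Int.floordiv (n1 - 84 - 1) 12 + 1)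
  else n1

def build_symbol_voicing_py_alt (pitch_classes : List Int) (root_pc : Int) : List Int :=
  let root_midi0 := root_pc + 48
  let root_midi := if root_midi0 < 36 then root_midi0 + 12 else root_midi0
  PySem.List.sorted
    (root_midi ::
      (pitch_classes.filter (fun pc => pc != root_pc)).map (fun pc => pvOctaveFold (pc + 48) root_midi))
    (fun x => x) false

-- ===== PRECONDITION & SPEC =====
def Spec_build_symbol_voicing_py (pitch_classes : List Int) (root_pc : Int) (out : List Int) : Prop := out = build_symbol_voicing_py_alt pitch_classes root_pc
instance (pitch_classes : List Int) (root_pc : Int) (out : List Int) : Decidable (Spec_build_symbol_voicing_py pitch_classes root_pc out) := by unfold Spec_build_symbol_voicing_py; infer_instance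

-- ===== CLAIM (what is proved, stated in full; the proofs are below) =====
def Claim_equal_build_symbol_voicing_py : Prop := ∀ (pitch_classes : List Int) (root_pc : Int), Dom_build_symbol_voicing_py pitch_classes root_pc → Spec_build_symbol_voicing_py pitch_classes root_pc (build_symbol_voicing_py pitch_classes root_pc)

-- ===== LEMMAS AND PROOFS =====

theorem pvRaiseAbove_eq (root_midi n : Int) :
    pvRaiseAbove root_midi n =
      if n ≤ root_midi then n + 12 * ((root_midi - n) / 12 + 1) else n := by
  induction n using pvRaiseAbove.induct root_midi with
  | case1 m h ih =>
      rw [pvRaiseAbove, if_pos h, ih]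
      split_ifs with h2 <;> omega
  | case2 m h =>
      rw [pvRaiseAbove, if_neg h, if_neg h]

theorem pvClampLow_eq (n : Int) :
    pvClampLow n = if n < 36 then n + 12 * ((35 - n) / 12 + 1) else n := by
  induction n using pvClampLow.induct with
  | case1 n h ih =>
      rw [pvClampLow, if_pos h, ih]
      split_ifs with h2 <;> omega
  | case2 n h =>
      rw [pvClampLow, if_neg h, if_neg h]

theorem pvClampHigh_eq (n : Int) :
    pvClampHigh n = if n > 84 then n - 12 * ((n - 85) / 12 + 1) else n := by
  induction n using pvClampHigh.induct with
  | case1 n h ih =>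
      rw [pvClampHigh, if_pos h, ih]
      split_ifs with h2 <;> omega
  | case2 n h =>
      rw [pvClampHigh, if_neg h, if_neg h]

theorem note_eq (root_midi pc : Int) :
    pvClampHigh (pvClampLow (pvRaiseAbove root_midi (pc + 48))) =
      pvOctaveFold (pc + 48) root_midi := by
  simp only [pvRaiseAbove_eq, pvClampLow_eq, pvClampHigh_eq, pvOctaveFold,
    PySem.Int.floordiv_eq_ediv_of_pos (show (0:Int) < 12 by norm_num)]
  split_ifs <;> omega

-- ===== VERDICT (by name: the statement is the Claim_ definition above) =====
theorem build_symbol_voicing_py_spec : Claim_equal_build_symbol_voicing_py := by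
  intro pitch_classes root_pc _
  unfold Spec_build_symbol_voicing_py build_symbol_voicing_py build_symbol_voicing_py_alt
  have hfun :
      (fun (acc : List Int) pc =>
          if pc == root_pc then acc
          else acc ++ [pvClampHigh (pvClampLow (pvRaiseAbove
            (if root_pc + 48 < 36 then root_pc + 48 + 12 else root_pc + 48) (pc + 48)))])
        = (fun (acc : List Int) pc =>
          if pc != root_pc then
            acc ++ [pvOctaveFold (pc + 48)
              (if root_pc + 48 < 36 then root_pc + 48 + 12 else root_pc + 48)]
          else acc) := by
    funext acc pc
    by_cases h : pc = root_pc <;> simp [h, note_eq]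
  simp only [hfun, PySem.List.foldl_append_if]
  rfl
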